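-- pv_equiv track=rewrite | github.com/mejoek/kitchen-floor-plan | claw-guard/claw_guard/proxy.py | _extract_model_from_path
-- ===== SOURCE A (Python) =====
-- def _extract_model_from_path(path: str) -> str:
--     """Extract the model ID from the request URL path.
--
--     TODO: Verify actual path format from OpenClaw/Gemini traffic.
--           Expected patterns:
--             /v1/models/gemini-3-pro:generateContent
--             /v1/models/gemini-2.5-pro:streamGenerateContent
--
--     PLACEHOLDER: Parses ``/v1/models/{model}:method`` format.
--     """
--     # /v1/models/{model_id}:{method}
--     parts = path.strip("/").split("/")
--     for i, part in enumerate(parts):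
--         if part == "models" and i + 1 < len(parts):
--             model_part = parts[i + 1]
--             # Strip the :method suffix
--             if ":" in model_part:
--                 return model_part.split(":")[0]
--             return model_part
--     return ""
-- ===== SOURCE B (Python) =====
-- def _extract_model_from_path(path: str) -> str:
--     # Character-level substring automaton: never splits the path into segments.
--     # Scan for "models/" anchored at a segment boundary (start of the stripped
--     # string or just after a '/'), then capture the following characters up to
--     # the first '/' or ':' -- exactly the regex (?:^|/)models/([^/:]*).
--     s = path.strip("/")
--     marker = "models/"
--     at_seg_start = True
--     i = 0
--     while i < len(s):
--         if at_seg_start and s.startswith(marker, i):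
--             j = i + len(marker)
--             k = j
--             while k < len(s) and s[k] != "/" and s[k] != ":":
--                 k += 1
--             return s[j:k]
--         at_seg_start = s[i] == "/"
--         i += 1
--     return ""
-- ===== Notes on version B (the rewrite author's own statement) =====
-- stated objective: alternative
-- what changed: A strips the path, splits it into a list of segments and walks enumerate(parts) with index arithmetic to index the segment after 'models' and split off the ':method' suffix; B never builds segments at all: it runs a character-level substring scan over the stripped string, matching 'models/' anchored at a segment boundary and capturing the following characters up to the first '/' or ':' (the regex (?:^|/)models/([^/:]*)).
import Mathlib
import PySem

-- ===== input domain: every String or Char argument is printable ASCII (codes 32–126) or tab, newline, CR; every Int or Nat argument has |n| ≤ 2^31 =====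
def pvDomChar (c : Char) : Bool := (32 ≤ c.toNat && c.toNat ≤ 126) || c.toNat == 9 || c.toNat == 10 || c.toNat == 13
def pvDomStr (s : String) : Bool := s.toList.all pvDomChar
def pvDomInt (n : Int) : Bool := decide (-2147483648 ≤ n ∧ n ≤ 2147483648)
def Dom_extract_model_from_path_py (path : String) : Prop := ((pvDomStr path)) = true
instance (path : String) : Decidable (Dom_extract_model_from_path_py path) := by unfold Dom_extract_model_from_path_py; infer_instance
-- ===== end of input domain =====

-- B replaces A's split-into-segments + enumerate/index loop by a character-level
-- substring scan ("models/" anchored at a segment boundary, capture up to '/' or ':');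
-- same return value everywhere ("alternative": same cost, different algorithm).

-- ===== PORT A =====
-- A's for-loop over enumerate(parts) with early returns, as structural recursion on the enumerate list.
def pvALoop (parts : List String) : List (Int × String) → String
  | [] => ""
  | (i, part) :: rest =>
    if part == "models" && decide (i + 1 < (parts.length : Int)) then
      let model_part := PySem.List.pyGetD parts (i + 1) ""
      if PySem.Str.isIn ":" model_part then
        -- model_part.split(":")[0]; sep ≠ "" so split? is some, and split never returns [], so [0] is in range
        ((PySem.Str.split? model_part ":").getD []).getD 0 ""
      else model_part
    else pvALoop parts rest

def extract_model_from_path_py (path : String) : String :=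
  let parts := (PySem.Str.split? (PySem.Str.stripChars path "/") "/").getD []
  pvALoop parts (PySem.List.enumerate parts 0)

-- ===== PORT B =====
-- inner while loop + slice s[j:k]: the characters after the marker up to the first '/' or ':'
def pvCapture (l : List Char) : String :=
  String.ofList (l.takeWhile (fun ch => ch != '/' && ch != ':'))

-- B's while loop over positions, as recursion on the remaining characters with the boundary flag
def pvScan : Bool → List Char → String
  | _, [] => ""
  | atB, c :: rest =>
    if atB && List.isPrefixOf "models/".toList (c :: rest) then
      pvCapture ((c :: rest).drop 7)
    else pvScan (c == '/') rest

def extract_model_from_path_py_alt (path : String) : String :=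
  pvScan true (PySem.Str.stripChars path "/").toList

-- ===== PRECONDITION & SPEC =====
def Spec_extract_model_from_path_py (path : String) (out : String) : Prop := out = extract_model_from_path_py_alt path
instance (path : String) (out : String) : Decidable (Spec_extract_model_from_path_py path out) := by unfold Spec_extract_model_from_path_py; infer_instance

-- ===== CLAIM (what is proved, stated in full; the proofs are below) =====
def Claim_equal_extract_model_from_path_py : Prop := ∀ (path : String), Dom_extract_model_from_path_py path → Spec_extract_model_from_path_py path (extract_model_from_path_py path)

-- ===== LEMMAS AND PROOFS =====

-- s.partition(c)[0]-style helper: the characters before the first c (whole string if absent)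
def pvPartitionFst (s : String) (c : Char) : String :=
  String.ofList (s.toList.takeWhile (fun x => x != c))

-- reference (fuel-free) shape of splitting on '/'
def pvRefSplit : List Char → List (List Char)
  | [] => [[]]
  | c :: rest =>
    if c = '/' then [] :: pvRefSplit rest
    else
      match pvRefSplit rest with
      | [] => [[c]]
      | s :: ps => (c :: s) :: ps

-- the find-over-adjacent-pairs functional both sides are reduced to
def pvFc (ps : List (List Char)) : String :=
  match (ps.zip (ps.drop 1)).find? (fun p => p.1 == "models".toList) with
  | none => ""
  | some p => pvPartitionFst (String.ofList p.2) ':'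

lemma pvRefSplit_ne_nil (l : List Char) : pvRefSplit l ≠ [] := by
  cases l with
  | nil => simp [pvRefSplit]
  | cons c rest =>
    by_cases hc : c = '/'
    · simp [pvRefSplit, hc]
    · simp only [pvRefSplit, hc, if_false]
      cases pvRefSplit rest <;> simp
-- head of splitOn.go once a first piece has been committed to the accumulator
lemma pv_go_head_acc (sep : List Char) (fuel : Nat) :
    ∀ (l cur : List Char) (acc : List (List Char)) (x : List Char),
      (PySem.Chars.splitOn.go sep fuel l cur (acc ++ [x])).head? = some x := by
  induction fuel with
  | zero =>
      intro l cur acc x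
      rw [PySem.Chars.splitOn.go.eq_def]
      simp
  | succ f ih =>
      intro l cur acc x
      rw [PySem.Chars.splitOn.go.eq_def]
      cases l with
      | nil => simp
      | cons c rest =>
          by_cases hp : sep.isPrefixOf (c :: rest) = true
          · simp only [hp, if_true]
            rw [show cur.reverse :: (acc ++ [x]) = (cur.reverse :: acc) ++ [x] from rfl]
            exact ih _ _ _ _
          · simp only [hp]
            exact ih _ _ _ _

lemma pv_go_head (c : Char) (fuel : Nat) :
    ∀ (l cur : List Char), l.length < fuel →
      (PySem.Chars.splitOn.go [c] fuel l cur []).head? =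
        some (cur.reverse ++ l.takeWhile (fun x => x != c)) := by
  induction fuel with
  | zero => intro l cur h; omega
  | succ f ih =>
      intro l cur h
      rw [PySem.Chars.splitOn.go.eq_def]
      cases l with
      | nil => simp
      | cons ch rest =>
          by_cases hc : ch = c
          · subst hc
            have hp : List.isPrefixOf [ch] (ch :: rest) = true := by
              simp [List.isPrefixOf]
            simp only [hp, if_true]
            rw [show (cur.reverse :: ([] : List (List Char))) = [] ++ [cur.reverse] from rfl]
            rw [pv_go_head_acc]
            simp
          · have hp : List.isPrefixOf [c] (ch :: rest) = true → False := by
              simp [List.isPrefixOf]; intro hcc; exact hc hcc.symm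
            simp only [eq_false_intro hp, if_false]
            rw [ih rest (ch :: cur) (by simpa using Nat.lt_of_succ_lt_succ h)]
            simp [hc]

lemma pv_split_head (s : List Char) (c : Char) :
    (PySem.Chars.splitOn s [c]).head? = some (s.takeWhile (fun x => x != c)) := by
  have := pv_go_head c (s.length + 1) s [] (Nat.lt_succ_self _)
  simpa [PySem.Chars.splitOn] using this

-- A's guarded split = partition-first, for every follower string
lemma pv_suffix_eq (b : String) :
    (if PySem.Str.isIn ":" b then ((PySem.Str.split? b ":").getD []).getD 0 "" else b)
      = pvPartitionFst b ':' := by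
  by_cases hin : PySem.Str.isIn ":" b = true
  · rw [if_pos hin]
    have h := pv_split_head b.toList ':'
    rw [List.head?_eq_some_iff] at h
    obtain ⟨t, ht⟩ := h
    simp [PySem.Str.split?, PySem.Chars.split?, ht, pvPartitionFst]
  · rw [if_neg hin]
    have hmem : ':' ∉ b.toList := by
      intro hm
      apply hin
      rw [PySem.Str.isIn, PySem.Chars.isIn_iff_infix]
      obtain ⟨s1, t1, hst⟩ := List.append_of_mem hm
      rw [show (":".toList) = [':'] from rfl, hst]
      exact ⟨s1, t1, by simp⟩
    have : b.toList.takeWhile (fun x => x != ':') = b.toList := by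
      apply List.takeWhile_eq_self_iff.mpr ?_
      intro x hx
      simp only [bne_iff_ne, ne_eq]
      intro hxx; exact hmem (hxx ▸ hx)
    simp [pvPartitionFst, this]

lemma pv_getD_mid (pre : List String) (a b : String) (t : List String) :
    PySem.List.pyGetD (pre ++ a :: b :: t) ((pre.length : Int) + 1) "" = b := by
  rw [show (pre.length : Int) + 1 = ((pre.length + 1 : Nat) : Int) by push_cast; ring]
  rw [PySem.List.pyGetD_natCast]
  rw [List.getD_eq_getElem?_getD, List.getElem?_append_right (by omega)]
  simp

-- A's loop = find over adjacent segment pairs (String level)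
lemma pv_main (suf : List String) : ∀ (pre : List String),
    pvALoop (pre ++ suf) (PySem.List.enumerate suf (pre.length : Int)) =
      (match (suf.zip (suf.drop 1)).find? (fun p => p.1 == "models") with
       | none => ""
       | some p => pvPartitionFst p.2 ':') := by
  induction suf with
  | nil => intro pre; simp [pvALoop, PySem.List.enumerate_nil]
  | cons a t ih =>
      intro pre
      rw [PySem.List.enumerate_cons, pvALoop]
      by_cases ha : a = "models"
      · subst ha
        cases t with
        | nil => simp [pvALoop]
        | cons b t' =>
            have hcond : (decide ((pre.length : Int) + 1 < (((pre ++ "models" :: b :: t').length : Nat) : Int))) = true := by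
              simp
            simp only [hcond, beq_self_eq_true, Bool.and_self, if_true]
            rw [pv_getD_mid]
            simpa [List.find?] using pv_suffix_eq b
      · have hne : (a == "models") = false := beq_eq_false_iff_ne.mpr ha
        simp only [hne, Bool.false_and]
        have hstep := ih (pre ++ [a])
        rw [List.append_assoc] at hstep
        simp only [List.singleton_append] at hstep
        have hlen : (((pre ++ [a]).length : Nat) : Int) = (pre.length : Int) + 1 := by
          simp
        rw [hlen] at hstep
        rw [hstep]
        cases t with
        | nil => simp
        | cons b t' => simp [hne]

-- splitOn.go with enough fuel computes pvRefSplit (with accumulator and current piece)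
lemma pv_go_refSplit (fuel : Nat) :
    ∀ (l cur : List Char) (acc : List (List Char)), l.length < fuel →
      PySem.Chars.splitOn.go ['/'] fuel l cur acc =
        acc.reverse ++ (match pvRefSplit l with
                        | [] => []
                        | s :: ps => (cur.reverse ++ s) :: ps) := by
  induction fuel with
  | zero => intro l cur acc h; omega
  | succ f ih =>
      intro l cur acc h
      rw [PySem.Chars.splitOn.go.eq_def]
      cases l with
      | nil => simp [pvRefSplit]
      | cons c rest =>
          by_cases hc : c = '/'
          · subst hc
            have hp : List.isPrefixOf ['/'] ('/' :: rest) = true := by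
              simp [List.isPrefixOf]
            simp only [hp, if_true]
            rw [show List.drop (['/'].length) ('/' :: rest) = rest from rfl]
            rw [ih rest [] (cur.reverse :: acc) (by simpa using Nat.lt_of_succ_lt_succ h)]
            obtain ⟨s, ps, hsp⟩ : ∃ s ps, pvRefSplit rest = s :: ps := by
              cases hr : pvRefSplit rest with
              | nil => exact absurd hr (pvRefSplit_ne_nil rest)
              | cons s ps => exact ⟨s, ps, rfl⟩
            simp [pvRefSplit, hsp]
          · have hp : List.isPrefixOf ['/'] (c :: rest) = true → False := by
              simp [List.isPrefixOf]; intro hcc; exact hc hcc.symm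
            simp only [eq_false_intro hp, if_false]
            rw [ih rest (c :: cur) acc (by simpa using Nat.lt_of_succ_lt_succ h)]
            obtain ⟨s, ps, hsp⟩ : ∃ s ps, pvRefSplit rest = s :: ps := by
              cases hr : pvRefSplit rest with
              | nil => exact absurd hr (pvRefSplit_ne_nil rest)
              | cons s ps => exact ⟨s, ps, rfl⟩
            simp [pvRefSplit, hc, hsp]

lemma pv_splitOn_eq (l : List Char) : PySem.Chars.splitOn l ['/'] = pvRefSplit l := by
  have := pv_go_refSplit (l.length + 1) l [] [] (Nat.lt_succ_self _)
  obtain ⟨s, ps, hsp⟩ : ∃ s ps, pvRefSplit l = s :: ps := by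
    cases hr : pvRefSplit l with
    | nil => exact absurd hr (pvRefSplit_ne_nil l)
    | cons s ps => exact ⟨s, ps, rfl⟩
  simpa [PySem.Chars.splitOn, hsp] using this

lemma pv_parts_eq (s : String) :
    (PySem.Str.split? s "/").getD [] = (pvRefSplit s.toList).map String.ofList := by
  have : ("/" : String).toList = ['/'] := rfl
  simp [PySem.Str.split?, PySem.Chars.split?, this, pv_splitOn_eq]

-- the String-level find-over-pairs on mapped segments is pvFc
lemma pv_F_map (ps : List (List Char)) :
    (match (((ps.map String.ofList)).zip ((ps.map String.ofList).drop 1)).find? (fun p => p.1 == "models") with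
     | none => ""
     | some p => pvPartitionFst p.2 ':') = pvFc ps := by
  rw [← List.map_drop, List.zip_map, List.find?_map]
  have hpred : ((fun p : String × String => p.1 == "models") ∘ Prod.map String.ofList String.ofList)
      = (fun p : List Char × List Char => p.1 == "models".toList) := by
    funext p
    simp only [Function.comp, Prod.map]
    rw [Bool.eq_iff_iff]
    simp only [beq_iff_eq]
    constructor
    · intro hh
      rw [← String.toList_ofList (l := p.1), hh]
    · intro hh
      rw [hh]
      rfl
  rw [hpred]
  unfold pvFc
  cases (ps.zip (ps.drop 1)).find? (fun p => p.1 == "models".toList) with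
  | none => rfl
  | some p => simp [Prod.map]

lemma pvFc_cons_ne (s0 : List Char) (ps : List (List Char))
    (h : (s0 == "models".toList) = false) : pvFc (s0 :: ps) = pvFc ps := by
  have h' : (s0 == ['m','o','d','e','l','s']) = false := h
  cases ps with
  | nil => rfl
  | cons p1 ps' => simp [pvFc, List.find?, h']
lemma pvRefSplit_head (l : List Char) :
    (pvRefSplit l).head? = some (l.takeWhile (fun c => c != '/')) := by
  induction l with
  | nil => rfl
  | cons c rest ih =>
    by_cases hc : c = '/'
    · simp [pvRefSplit, hc]
    · obtain ⟨s, ps, hsp⟩ : ∃ s ps, pvRefSplit rest = s :: ps := by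
        cases hr : pvRefSplit rest with
        | nil => exact absurd hr (pvRefSplit_ne_nil rest)
        | cons s ps => exact ⟨s, ps, rfl⟩
      rw [hsp] at ih
      simp only [List.head?] at ih
      have hb : (c != '/') = true := by simp [hc]
      simp [pvRefSplit, hc, hsp, List.takeWhile, hb] at ih ⊢
      exact ih
lemma pvRefSplit_decomp (l : List Char) :
    pvRefSplit l = [l] ∨
      ∃ u, l = l.takeWhile (fun c => c != '/') ++ '/' :: u ∧
        pvRefSplit l = l.takeWhile (fun c => c != '/') :: pvRefSplit u := by
  induction l with
  | nil => left; rfl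
  | cons c rest ih =>
    by_cases hc : c = '/'
    · right
      refine ⟨rest, ?_, ?_⟩
      · simp [List.takeWhile, hc]
      · simp [pvRefSplit, List.takeWhile, hc]
    · rcases ih with h1 | ⟨u, hu1, hu2⟩
      · left
        simp [pvRefSplit, hc, h1]
      · right
        refine ⟨u, ?_, ?_⟩
        · have hb : (c != '/') = true := by simp [hc]
          conv_lhs => rw [show rest = List.takeWhile (fun c => c != '/') rest ++ '/' :: u from hu1]
          simp [List.takeWhile, hb]
        · obtain ⟨s, ps, hsp⟩ : ∃ s ps, pvRefSplit u = s :: ps := by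
            cases hr : pvRefSplit u with
            | nil => exact absurd hr (pvRefSplit_ne_nil u)
            | cons s ps => exact ⟨s, ps, rfl⟩
          have hb : (c != '/') = true := by simp [hc]
          rw [hsp] at hu2
          simp [pvRefSplit, hc, hu2, List.takeWhile, hsp, hb]
lemma pv_takeWhile_both (u : List Char) :
    List.takeWhile (fun x => x != ':') (List.takeWhile (fun ch => ch != '/') u)
      = List.takeWhile (fun ch => ch != '/' && ch != ':') u := by
  rw [List.takeWhile_takeWhile]
  congr 1
  funext a
  by_cases h1 : a = '/' <;> by_cases h2 : a = ':' <;> simp [h1, h2]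
lemma pv_slashfree_append (s0m u : List Char) (hsl : ('/' : Char) ∉ s0m) :
    pvRefSplit (s0m ++ '/' :: u) = s0m :: pvRefSplit u := by
  induction s0m with
  | nil => simp [pvRefSplit]
  | cons a s0' ih2 =>
    have ha : a ≠ '/' := by intro hh; exact hsl (hh ▸ List.mem_cons_self)
    have := ih2 (fun hm => hsl (List.mem_cons_of_mem a hm))
    obtain ⟨s1, ps1, hsp1⟩ : ∃ s1 ps1, pvRefSplit (s0' ++ '/' :: u) = s1 :: ps1 := by
      cases hr : pvRefSplit (s0' ++ '/' :: u) with
      | nil => exact absurd hr (pvRefSplit_ne_nil _)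
      | cons s1 ps1 => exact ⟨s1, ps1, rfl⟩
    rw [hsp1] at this
    simp only [List.cons.injEq] at this
    simp [pvRefSplit, ha, hsp1, this.1, this.2]
lemma pv_scan_spec (l : List Char) :
    pvScan true l = pvFc (pvRefSplit l) ∧
      pvScan false l = pvFc ((pvRefSplit l).drop 1) := by
  induction l with
  | nil => constructor <;> rfl
  | cons c rest ih =>
    obtain ⟨s0, ps, hsp⟩ : ∃ s0 ps, pvRefSplit rest = s0 :: ps := by
      cases hr : pvRefSplit rest with
      | nil => exact absurd hr (pvRefSplit_ne_nil rest)
      | cons s0 ps => exact ⟨s0, ps, rfl⟩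
    have hsplit_cons_slash : c = '/' → pvRefSplit (c :: rest) = [] :: pvRefSplit rest := by
      intro hc; simp [pvRefSplit, hc]
    have hsplit_cons : c ≠ '/' → pvRefSplit (c :: rest) = (c :: s0) :: ps := by
      intro hc; simp [pvRefSplit, hc, hsp]
    constructor
    · by_cases hp : List.isPrefixOf "models/".toList (c :: rest) = true
      · simp only [pvScan, hp, Bool.true_and, if_true]
        rw [List.isPrefixOf_iff_prefix] at hp
        obtain ⟨u, hu⟩ := hp
        have hl : c :: rest = "models".toList ++ '/' :: u := by rw [← hu]; rfl
        have hdrop : (c :: rest).drop 7 = u := by rw [← hu]; simp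
        rw [hdrop, hl, pv_slashfree_append _ _ (by decide)]
        obtain ⟨h1, ps1, hsp1⟩ : ∃ h1 ps1, pvRefSplit u = h1 :: ps1 := by
          cases hr : pvRefSplit u with
          | nil => exact absurd hr (pvRefSplit_ne_nil u)
          | cons h1 ps1 => exact ⟨h1, ps1, rfl⟩
        have hhead : h1 = u.takeWhile (fun ch => ch != '/') := by
          have := pvRefSplit_head u
          rw [hsp1] at this
          simpa using this
        rw [hsp1]
        have hfind : pvFc ("models".toList :: h1 :: ps1) = pvPartitionFst (String.ofList h1) ':' := by
          simp [pvFc, List.find?]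
        rw [hfind, hhead]
        unfold pvCapture pvPartitionFst
        rw [String.toList_ofList, pv_takeWhile_both]
      · simp only [pvScan, hp, Bool.true_and, if_false]
        by_cases hc : c = '/'
        · rw [show (c == '/') = true from by simp [hc]]
          rw [ih.1, hsplit_cons_slash hc]
          exact (pvFc_cons_ne [] _ (by decide)).symm
        · rw [show (c == '/') = false from by simp [hc]]
          rw [ih.2, hsp, hsplit_cons hc]
          simp only [List.drop_one, List.tail_cons]
          cases ps with
          | nil => rfl
          | cons p1 ps' =>
            by_cases hm : (c :: s0) = "models".toList
            · exfalso
              rcases pvRefSplit_decomp rest with h1 | ⟨u, hu1, hu2⟩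
              · rw [hsp] at h1
                simp at h1
              · rw [hsp] at hu2
                have htw : s0 = rest.takeWhile (fun c => c != '/') := (List.cons.inj hu2).1
                have hcs : c :: rest = (c :: s0) ++ '/' :: u := by
                  rw [hu1, htw]; rfl
                apply hp
                rw [List.isPrefixOf_iff_prefix]
                refine ⟨u, ?_⟩
                rw [hcs, hm]
                simp
            · exact (pvFc_cons_ne _ _ (by simpa using hm)).symm
    · simp only [pvScan, Bool.false_and, if_false]
      by_cases hc : c = '/'
      · rw [show (c == '/') = true from by simp [hc]]
        rw [ih.1, hsplit_cons_slash hc]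
        simp
      · rw [show (c == '/') = false from by simp [hc]]
        rw [ih.2, hsp, hsplit_cons hc]
        simp

-- ===== VERDICT (by name: the statement is the Claim_ definition above) =====
theorem extract_model_from_path_py_spec : Claim_equal_extract_model_from_path_py := by
  intro path _
  unfold Spec_extract_model_from_path_py extract_model_from_path_py extract_model_from_path_py_alt
  have hA := pv_main ((PySem.Str.split? (PySem.Str.stripChars path "/") "/").getD []) []
  simp only [List.nil_append] at hA
  rw [show ((([] : List String).length : Nat) : Int) = (0 : Int) by simp] at hA
  rw [hA, pv_parts_eq, pv_F_map]
  exact (pv_scan_spec (PySem.Str.stripChars path "/").toList).1.symm
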